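-- pv_equiv track=rewrite | github.com/GeorgeKovshov/codewars2 | codewars11.py | dead_ant_count
-- ===== SOURCE A (Python) =====
-- def dead_ant_count(ants):
--     dict = {
--         'a': 0,
--         'n': 0,
--         't': 0
--     }
--     count = 0
--
--     for i in range(len(ants)):
--         x = ants[i]
--         if x in dict:
--             dict[x] += 1
--         if i > 1:
--             if ants[i - 2] == 'a' and ants[i - 1] == 'n' and ants[i] == 't':
--                 count += 1
--     maxi = 0
--     for y in dict:
--         maxi = dict[y] if dict[y] > maxi else maxi
--     return maxi - count
-- ===== SOURCE B (Python) =====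
-- def dead_ant_count(ants):
--     return max(ants.count('a'), ants.count('n'), ants.count('t')) - ants.count('ant')
-- ===== Notes on version B (the rewrite author's own statement) =====
-- stated objective: idiomatic
-- what changed: Replaced the index loop that maintains a letter dict and checks a 3-char window by a single expression over four str.count scans (non-overlapping 'ant' count equals the window count because 'ant' cannot overlap itself).
import Mathlib
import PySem

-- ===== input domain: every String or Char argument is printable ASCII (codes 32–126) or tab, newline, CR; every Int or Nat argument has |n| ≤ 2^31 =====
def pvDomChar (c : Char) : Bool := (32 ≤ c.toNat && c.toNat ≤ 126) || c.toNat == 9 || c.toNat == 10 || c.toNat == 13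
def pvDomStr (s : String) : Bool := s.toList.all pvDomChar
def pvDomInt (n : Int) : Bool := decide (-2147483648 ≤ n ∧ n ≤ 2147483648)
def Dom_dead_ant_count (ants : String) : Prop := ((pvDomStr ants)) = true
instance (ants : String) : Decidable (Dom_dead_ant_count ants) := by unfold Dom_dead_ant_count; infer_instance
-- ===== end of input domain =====

-- B replaces A's index loop (letter dict + 3-char window check) by one expression over four counts.

-- ===== PORT A =====
def dead_ant_count (ants : String) : Int :=
  let cs := ants.toList
  let d0 : PySem.Dict Char Int :=
    ((PySem.Dict.empty.insert 'a' 0).insert 'n' 0).insert 't' 0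
  let st :=
    (PySem.List.pyRange 0 (cs.length : Int) 1).foldl
      (fun (st : PySem.Dict Char Int × Int) i =>
        let x := PySem.List.pyGetD cs i ' '
        let d := if st.1.contains x then st.1.modify x 0 (· + 1) else st.1
        let c :=
          if 1 < i then
            if PySem.List.pyGetD cs (i - 2) ' ' = 'a' ∧ PySem.List.pyGetD cs (i - 1) ' ' = 'n' ∧
               PySem.List.pyGetD cs i ' ' = 't' then st.2 + 1 else st.2
          else st.2
        (d, c)) (d0, 0)
  let maxi := st.1.keys.foldl (fun maxi y => if st.1.getD y 0 > maxi then st.1.getD y 0 else maxi) 0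
  maxi - st.2

-- ===== PORT B =====
def dead_ant_count_alt (ants : String) : Int :=
  max (max (PySem.Str.count ants "a" : Int) (PySem.Str.count ants "n" : Int))
      (PySem.Str.count ants "t" : Int)
    - (PySem.Str.count ants "ant" : Int)

-- ===== PRECONDITION & SPEC =====
def Spec_dead_ant_count (ants : String) (out : Int) : Prop := out = dead_ant_count_alt ants
instance (ants : String) (out : Int) : Decidable (Spec_dead_ant_count ants out) := by unfold Spec_dead_ant_count; infer_instance

-- ===== CLAIM (what is proved, stated in full; the proofs are below) =====
def Claim_equal_dead_ant_count : Prop := ∀ (ants : String), Dom_dead_ant_count ants → Spec_dead_ant_count ants (dead_ant_count ants)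

-- ===== LEMMAS AND PROOFS =====

-- number of (overlapping) occurrences of "ant" as a window, by structural recursion
def refW : List Char → Nat
  | a :: b :: c :: r => (if a = 'a' ∧ b = 'n' ∧ c = 't' then 1 else 0) + refW (b :: c :: r)
  | _ => 0

-- window predicate at start position j
def Wp (cs : List Char) (j : Nat) : Bool :=
  (cs[j]? == some 'a') && (cs[j+1]? == some 'n') && (cs[j+2]? == some 't')

-- window predicate at END position i (the shape A's loop tests)
def Ep (cs : List Char) (i : Nat) : Bool := decide (2 ≤ i) && Wp cs (i - 2)

lemma refW_nt (r : List Char) : refW ('n' :: 't' :: r) = refW r := by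
  match r with
  | [] => simp [refW]
  | [c] => simp [refW]
  | c :: d :: r' => simp [refW]

lemma count_go_ant (fuel : Nat) : ∀ (l : List Char) (acc : Nat), l.length ≤ fuel →
    PySem.Chars.count.go ['a','n','t'] fuel l acc = acc + refW l := by
  induction fuel with
  | zero =>
    intro l acc h
    have : l = [] := by cases l <;> simp_all
    subst this; simp [PySem.Chars.count.go, refW]
  | succ fuel ih =>
    intro l acc h
    match l with
    | [] => simp [PySem.Chars.count.go, refW]
    | h₁ :: t =>
      rw [PySem.Chars.count.go]
      by_cases hp : List.isPrefixOf ['a','n','t'] (h₁ :: t) = true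
      · simp only [hp, if_true]
        obtain ⟨r, hr⟩ := (List.isPrefixOf_iff_prefix.mp hp)
        have hl : h₁ :: t = 'a' :: 'n' :: 't' :: r := by rw [← hr]; rfl
        rw [hl] at h ⊢
        simp only [List.length_cons, List.length_nil, List.drop_succ_cons, List.drop_zero]
        rw [ih r (acc + 1) (by simp only [List.length_cons] at h; omega)]
        simp [refW, refW_nt]
        omega
      · simp only [hp]
        rw [ih t acc (by simp at h; omega)]
        match t with
        | [] => simp [refW]
        | [b] => simp [refW]
        | b :: c :: r =>
          have : ¬ (h₁ = 'a' ∧ b = 'n' ∧ c = 't') := by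
            intro ⟨h1, h2, h3⟩; subst h1; subst h2; subst h3
            simp [List.isPrefixOf] at hp
          simp [refW, this]

lemma count_ant (cs : List Char) : PySem.Chars.count cs ['a','n','t'] = refW cs := by
  rw [PySem.Chars.count]
  simp only [List.isEmpty_cons, if_false, Bool.false_eq_true]
  simpa using count_go_ant cs.length cs 0 le_rfl

lemma count_go_single (v : Char) (fuel : Nat) : ∀ (l : List Char) (acc : Nat), l.length ≤ fuel →
    PySem.Chars.count.go [v] fuel l acc = acc + l.count v := by
  induction fuel with
  | zero =>
    intro l acc h
    have : l = [] := by cases l <;> simp_all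
    subst this; simp [PySem.Chars.count.go]
  | succ fuel ih =>
    intro l acc h
    match l with
    | [] => simp [PySem.Chars.count.go]
    | h₁ :: t =>
      rw [PySem.Chars.count.go]
      by_cases hv : h₁ = v
      · subst hv
        simp only [List.isPrefixOf, Bool.and_true, beq_self_eq_true, if_true,
                   List.length_cons, List.length_nil, List.drop_succ_cons, List.drop_zero]
        rw [ih t (acc + 1) (by simp at h; omega)]
        simp; omega
      · have hv' : ¬ (v = h₁) := fun e => hv e.symm
        have : List.isPrefixOf [v] (h₁ :: t) = false := by
          simp [List.isPrefixOf, hv']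
        simp only [this, Bool.false_eq_true, if_false]
        rw [ih t acc (by simp at h; omega)]
        rw [List.count_cons_of_ne hv]

lemma count_single (cs : List Char) (v : Char) : PySem.Chars.count cs [v] = cs.count v := by
  rw [PySem.Chars.count]
  simp only [List.isEmpty_cons, if_false, Bool.false_eq_true]
  simpa using count_go_single v cs.length cs 0 le_rfl

lemma refW_cons (c : Char) (cs : List Char) :
    refW (c :: cs) = (if c = 'a' ∧ cs[0]? = some 'n' ∧ cs[1]? = some 't' then 1 else 0) + refW cs := by
  match cs with
  | [] => simp [refW]
  | [b] => simp [refW]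
  | b :: d :: r => simp [refW]

lemma refW_eq_countP (cs : List Char) :
    refW cs = (List.range cs.length).countP (Wp cs) := by
  induction cs with
  | nil => simp [refW]
  | cons c cs ih =>
    rw [refW_cons, ih]
    have hlen : (c :: cs).length = cs.length + 1 := rfl
    rw [hlen, List.range_succ_eq_map, List.countP_cons, List.countP_map]
    have hshift : (Wp (c :: cs)) ∘ Nat.succ = Wp cs := by
      funext j; simp [Wp, Function.comp]
    rw [hshift]
    by_cases h : c = 'a' ∧ cs[0]? = some 'n' ∧ cs[1]? = some 't'
    · obtain ⟨h1, h2, h3⟩ := h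
      simp [Wp, h1, h2, h3]
      try omega
    · have : Wp (c :: cs) 0 = false := by
        simp only [Wp]
        by_contra hb
        simp at hb
        exact h ⟨hb.1, hb.2.1, hb.2.2⟩
      simp [this, h]
      try omega

lemma Wp_false_of_ge (cs : List Char) (j : Nat) (h : cs.length ≤ j + 2) : Wp cs j = false := by
  have : cs[j+2]? = none := by simp; omega
  simp [Wp, this]

lemma countP_Ep_shift (cs : List Char) (k : Nat) :
    (List.range (k + 2)).countP (Ep cs) = (List.range k).countP (Wp cs) := by
  have : k + 2 = 2 + k := by omega
  rw [this, List.range_add, List.countP_append, List.countP_map]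
  have h2 : (List.range 2).countP (Ep cs) = 0 := by
    have : List.range 2 = [0, 1] := by decide
    simp [this, Ep]
  rw [h2]
  have : (Ep cs) ∘ (2 + ·) = Wp cs := by
    funext j
    simp only [Ep, Function.comp]
    have h1 : decide (2 ≤ 2 + j) = true := by simp
    have h2 : 2 + j - 2 = j := by omega
    rw [h1, h2, Bool.true_and]
  rw [this]
  try omega

lemma countP_Ep_eq_refW (cs : List Char) :
    (List.range cs.length).countP (Ep cs) = refW cs := by
  rw [refW_eq_countP]
  match cs with
  | [] => simp
  | [c] =>
    have : List.range 1 = [0] := by decide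
    simp [this, Ep, Wp]
  | a :: b :: r =>
    have hlen : (a :: b :: r).length = r.length + 2 := by simp
    rw [hlen, countP_Ep_shift]
    have : r.length + 2 = r.length + 2 := rfl
    rw [List.range_add, List.countP_append, List.countP_map]
    have hw0 : Wp (a :: b :: r) (r.length + 0) = false :=
      Wp_false_of_ge _ _ (by simp)
    have hw1 : Wp (a :: b :: r) (r.length + 1) = false :=
      Wp_false_of_ge _ _ (by simp)
    have hz : (List.range 2).countP ((Wp (a :: b :: r)) ∘ (r.length + ·)) = 0 := by
      have h2 : List.range 2 = [0, 1] := by decide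
      simp only [h2, List.countP_cons, List.countP_nil, Function.comp, hw0, hw1]
      simp
    rw [hz]
    omega

-- the literal dict with the three counters
def mkd (a n t : Int) : PySem.Dict Char Int :=
  ((PySem.Dict.empty.insert 'a' a).insert 'n' n).insert 't' t

lemma mkd_items (a n t : Int) : (mkd a n t).items = [('a', a), ('n', n), ('t', t)] := by
  simp [mkd, PySem.Dict.insert, PySem.Dict.empty, PySem.Dict.contains]

lemma mkd_contains (a n t : Int) (x : Char) :
    (mkd a n t).contains x = (x == 'a' || x == 'n' || x == 't') := by
  simp [PySem.Dict.contains, mkd_items, BEq.comm, Bool.or_assoc]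

lemma mkd_modify_a (a n t : Int) : (mkd a n t).modify 'a' 0 (· + 1) = mkd (a + 1) n t := by
  apply PySem.Dict.ext
  simp [PySem.Dict.modify, PySem.Dict.insert, PySem.Dict.contains, PySem.Dict.getD,
        PySem.Dict.get?, mkd_items]

lemma mkd_modify_n (a n t : Int) : (mkd a n t).modify 'n' 0 (· + 1) = mkd a (n + 1) t := by
  apply PySem.Dict.ext
  simp [PySem.Dict.modify, PySem.Dict.insert, PySem.Dict.contains, PySem.Dict.getD,
        PySem.Dict.get?, mkd_items]

lemma mkd_modify_t (a n t : Int) : (mkd a n t).modify 't' 0 (· + 1) = mkd a n (t + 1) := by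
  apply PySem.Dict.ext
  simp [PySem.Dict.modify, PySem.Dict.insert, PySem.Dict.contains, PySem.Dict.getD,
        PySem.Dict.get?, mkd_items]

-- A's loop body over a Nat index
def stepA (cs : List Char) (st : PySem.Dict Char Int × Int) (i : Int) : PySem.Dict Char Int × Int :=
  let x := PySem.List.pyGetD cs i ' '
  let d := if st.1.contains x then st.1.modify x 0 (· + 1) else st.1
  let c :=
    if 1 < i then
      if PySem.List.pyGetD cs (i - 2) ' ' = 'a' ∧ PySem.List.pyGetD cs (i - 1) ' ' = 'n' ∧
         PySem.List.pyGetD cs i ' ' = 't' then st.2 + 1 else st.2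
    else st.2
  (d, c)

lemma loopA_invariant (cs : List Char) (m : Nat) (hm : m ≤ cs.length) :
    ((List.range m).map (fun k : Nat => (k : Int))).foldl (stepA cs) (mkd 0 0 0, 0) =
      (mkd ((cs.take m).count 'a' : Int) ((cs.take m).count 'n' : Int) ((cs.take m).count 't' : Int),
       ((List.range m).countP (Ep cs) : Int)) := by
  induction m with
  | zero => simp
  | succ m ih =>
    have hm' : m ≤ cs.length := by omega
    have hlt : m < cs.length := by omega
    rw [List.range_succ, List.map_append, List.foldl_append, ih hm']
    simp only [List.map_cons, List.map_nil, List.foldl_cons, List.foldl_nil]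
    have hx : PySem.List.pyGetD cs (m : Int) ' ' = cs[m] := by
      rw [PySem.List.pyGetD_natCast]
      exact List.getD_eq_getElem cs ' ' hlt
    have htake : cs.take (m + 1) = cs.take m ++ [cs[m]] := by
      rw [← List.take_concat_get' cs m hlt]
    have hcount : ∀ v : Char, ((cs.take (m+1)).count v : Int) =
        ((cs.take m).count v : Int) + (if cs[m] = v then 1 else 0) := by
      intro v
      rw [htake, List.count_append]
      rcases Decidable.em (cs[m] = v) with h | h
      · simp [h]
      · have h' : ¬ (v = cs[m]) := fun e => h e.symm
        rw [if_neg h]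
        have hz : List.count v [cs[m]] = 0 := by rw [List.count_singleton]; simp [h]
        rw [hz]
        simp
    have hEp : 2 ≤ m → (Ep cs m = true ↔ (cs[m-2] = 'a' ∧ cs[m-1] = 'n' ∧ cs[m] = 't')) := by
      intro hm2
      simp only [Ep, Wp, Bool.and_eq_true, decide_eq_true_eq, beq_iff_eq]
      rw [List.getElem?_eq_getElem (show m - 2 < cs.length by omega),
          List.getElem?_eq_getElem (show m - 2 + 1 < cs.length by omega),
          List.getElem?_eq_getElem (show m - 2 + 2 < cs.length by omega)]
      have e1 : m - 2 + 1 = m - 1 := by omega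
      have e2 : m - 2 + 2 = m := by omega
      simp only [e1, e2, Option.some.injEq]
      tauto
    -- the count component
    have hcnt : (stepA cs (mkd ((cs.take m).count 'a' : Int) ((cs.take m).count 'n' : Int)
        ((cs.take m).count 't' : Int), ((List.range m).countP (Ep cs) : Int)) (m : Int)).2 =
        ((List.range (m+1)).countP (Ep cs) : Int) := by
      simp only [stepA]
      rw [List.range_succ, List.countP_append, List.countP_cons, List.countP_nil]
      by_cases h2 : 2 ≤ m
      · have h1 : (1 : Int) < (m : Int) := by exact_mod_cast h2
        have hi2 : (m : Int) - 2 = ((m - 2 : Nat) : Int) := by omega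
        have hi1 : (m : Int) - 1 = ((m - 1 : Nat) : Int) := by omega
        rw [if_pos h1, hi2, hi1, PySem.List.pyGetD_natCast, PySem.List.pyGetD_natCast, hx,
            List.getD_eq_getElem cs ' ' (by omega), List.getD_eq_getElem cs ' ' (by omega)]
        by_cases hw : cs[m-2] = 'a' ∧ cs[m-1] = 'n' ∧ cs[m] = 't'
        · rw [if_pos hw, (hEp h2).mpr hw]
          push_cast
          simp
          try omega
        · have hf : Ep cs m = false := by
            have := fun hb => hw ((hEp h2).mp hb)
            exact Bool.not_eq_true _ |>.mp this
          rw [if_neg hw, hf]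
          push_cast
          simp
      · have h1 : ¬ ((1 : Int) < (m : Int)) := by
          simp at h2
          omega
        have hf : Ep cs m = false := by
          simp [Ep]
          omega
        rw [if_neg h1, hf]
        push_cast
        simp
    -- the dict component
    have hd : (stepA cs (mkd ((cs.take m).count 'a' : Int) ((cs.take m).count 'n' : Int)
        ((cs.take m).count 't' : Int), ((List.range m).countP (Ep cs) : Int)) (m : Int)).1 =
        mkd ((cs.take (m+1)).count 'a' : Int) ((cs.take (m+1)).count 'n' : Int)
            ((cs.take (m+1)).count 't' : Int) := by
      simp only [stepA, hx, mkd_contains]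
      by_cases ha : cs[m] = 'a'
      · rw [ha]
        simp only [beq_self_eq_true, Bool.true_or, if_true, mkd_modify_a]
        rw [hcount 'a', hcount 'n', hcount 't', ha]
        simp
      · by_cases hn : cs[m] = 'n'
        · rw [hn]
          simp only [beq_self_eq_true, Bool.or_true, Bool.true_or, if_true, mkd_modify_n]
          rw [hcount 'a', hcount 'n', hcount 't', hn]
          simp
        · by_cases ht : cs[m] = 't'
          · rw [ht]
            simp only [beq_self_eq_true, Bool.or_true, if_true, mkd_modify_t]
            rw [hcount 'a', hcount 'n', hcount 't', ht]
            simp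
          · have hc : (cs[m] == 'a' || cs[m] == 'n' || cs[m] == 't') = false := by
              simp [ha, hn, ht]
            rw [hc]
            simp only [Bool.false_eq_true, if_false]
            rw [hcount 'a', hcount 'n', hcount 't']
            simp [ha, hn, ht]
    exact Prod.ext hd (hcnt.trans (by rw [List.range_succ]))

lemma max_fold (a n t : Int) (ha : 0 ≤ a) :
    (if t > (if n > (if a > 0 then a else 0) then n else (if a > 0 then a else 0))
      then t else (if n > (if a > 0 then a else 0) then n else (if a > 0 then a else 0)))
    = max (max a n) t := by
  simp only [max_def]
  split_ifs <;> omega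

-- ===== VERDICT (by name: the statement is the Claim_ definition above) =====
theorem dead_ant_count_spec : Claim_equal_dead_ant_count := by
  intro ants _
  unfold Spec_dead_ant_count dead_ant_count dead_ant_count_alt
  set cs := ants.toList with hcs
  simp only []
  have hrange : PySem.List.pyRange 0 (cs.length : Int) 1 = (List.range cs.length).map (fun k : Nat => (k : Int)) := by
    exact PySem.List.pyRange_zero_nat cs.length
  have hd0 : ((PySem.Dict.empty.insert 'a' (0:Int)).insert 'n' 0).insert 't' 0 = mkd 0 0 0 := rfl
  rw [hrange, hd0]
  have hfold := loopA_invariant cs cs.length le_rfl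
  have hstep : ∀ (st : PySem.Dict Char Int × Int) (i : Int),
      (fun (st : PySem.Dict Char Int × Int) i =>
        let x := PySem.List.pyGetD cs i ' '
        let d := if st.1.contains x then st.1.modify x 0 (· + 1) else st.1
        let c :=
          if 1 < i then
            if PySem.List.pyGetD cs (i - 2) ' ' = 'a' ∧ PySem.List.pyGetD cs (i - 1) ' ' = 'n' ∧
               PySem.List.pyGetD cs i ' ' = 't' then st.2 + 1 else st.2
          else st.2
        (d, c)) st i = stepA cs st i := fun _ _ => rfl
  simp only [hstep]
  rw [List.take_length] at hfold
  rw [hfold]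
  -- the maxi fold over keys ['a','n','t']
  have hkeys : (mkd ((cs.count 'a' : Int)) ((cs.count 'n' : Int)) ((cs.count 't' : Int))).keys = ['a', 'n', 't'] := by
    simp [PySem.Dict.keys, mkd_items]
  rw [hkeys]
  simp only [List.foldl_cons, List.foldl_nil]
  have hgetD : ∀ (a n t : Int) (x : Char), x ∈ (['a','n','t'] : List Char) →
      (mkd a n t).getD x 0 = if x = 'a' then a else if x = 'n' then n else t := by
    intro a n t x _
    simp [PySem.Dict.getD, PySem.Dict.get?, mkd_items]
    rcases Decidable.em (x = 'a') with h | h <;> rcases Decidable.em (x = 'n') with h2 | h2 <;>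
      rcases Decidable.em (x = 't') with h3 | h3 <;> simp_all
  rw [hgetD _ _ _ 'a' (by simp), hgetD _ _ _ 'n' (by simp), hgetD _ _ _ 't' (by simp)]
  simp only [if_neg (by decide : ¬ ('n' : Char) = 'a'),
             if_neg (by decide : ¬ ('t' : Char) = 'a'), if_neg (by decide : ¬ ('t' : Char) = 'n')]
  rw [max_fold _ _ _ (by positivity)]
  -- B's side
  have hb1 : PySem.Str.count ants "a" = cs.count 'a' := by
    rw [PySem.Str.count_eq]; exact count_single cs 'a'
  have hb2 : PySem.Str.count ants "n" = cs.count 'n' := by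
    rw [PySem.Str.count_eq]; exact count_single cs 'n'
  have hb3 : PySem.Str.count ants "t" = cs.count 't' := by
    rw [PySem.Str.count_eq]; exact count_single cs 't'
  have hb4 : PySem.Str.count ants "ant" = refW cs := by
    rw [PySem.Str.count_eq]; exact count_ant cs
  rw [hb1, hb2, hb3, hb4, countP_Ep_eq_refW cs]
  simp
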